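-- pv_equiv track=rewrite | github.com/Ramesh6421/DSA | Greedy Algorithms/FreeCodeCamp/7.Seats.py | solve
-- ===== SOURCE A (Python) =====
-- def solve(A):
--     mod=10000003
--     crosses = [i for i,c in enumerate(A) if c=="x"]   # taking 'x' indexes
--     crosses = [(cross-i) for i,cross in enumerate(crosses)]  # moves req assuming starting postion is 0
--     n=len(crosses)
--     if n==0:
--         return 0
--     ans=float('inf')
--     segment_start = crosses[n//2]    # taking median
--     cur=0
--     for cross in crosses:
--         cur+=abs(cross-segment_start)
--         cur=cur%mod
--     ans=min(ans,cur%mod)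
--     return ans
-- ===== SOURCE B (Python) =====
-- def solve(A):
--     mod = 10000003
--     xs = [i for i, c in enumerate(A) if c == "x"]
--     crosses = [x - i for i, x in enumerate(xs)]
--     total = 0
--     lo, hi = 0, len(crosses) - 1
--     while lo < hi:
--         total += crosses[hi] - crosses[lo]
--         lo += 1
--         hi -= 1
--     return total % mod
-- ===== Notes on version B (the rewrite author's own statement) =====
-- stated objective: alternative
-- what changed: Replaces the median lookup plus per-element absolute-deviation loop (with a mod at every step) by a two-pointer inward walk that sums crosses[hi]-crosses[lo] over outermost pairs, taking the mod once at the end; the two agree by the extreme-pairing identity for sorted lists.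
import Mathlib
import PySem

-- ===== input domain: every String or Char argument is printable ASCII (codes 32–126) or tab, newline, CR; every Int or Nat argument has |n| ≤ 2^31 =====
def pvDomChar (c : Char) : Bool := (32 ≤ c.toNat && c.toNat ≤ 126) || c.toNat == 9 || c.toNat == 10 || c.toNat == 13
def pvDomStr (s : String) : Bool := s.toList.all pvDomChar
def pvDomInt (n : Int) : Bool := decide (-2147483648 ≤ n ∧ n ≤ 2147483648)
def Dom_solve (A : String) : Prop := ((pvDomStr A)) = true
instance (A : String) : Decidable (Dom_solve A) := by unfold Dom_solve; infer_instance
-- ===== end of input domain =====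

-- B replaces A's median + per-step-mod deviation loop by a two-pointer extreme-pairing
-- sum with one final mod (alternative decomposition; same O(n) cost).

-- ===== PORT A =====
def solve (A : String) : Int :=
  let xs := ((PySem.List.enumerate A.toList 0).filter (fun p => p.2 == 'x')).map (fun p => p.1)
  let crosses := (PySem.List.enumerate xs 0).map (fun p => p.2 - p.1)
  let n := crosses.length
  if n = 0 then 0
  else
    -- crosses[n//2]: here n ≥ 1 so 0 ≤ n/2 < n, the index is in range (exact)
    let segment_start := crosses.getD (n / 2) 0
    let cur := crosses.foldl (fun cur cross => (cur + |cross - segment_start|) % 10000003) 0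
    -- ans = min(float('inf'), cur % mod) = cur % mod, since cur % mod is a finite int (exact)
    cur % 10000003

-- ===== PORT B =====
-- the while-loop with indices lo, hi; in range while lo < hi ≤ len-1, so getD is exact;
-- Python's hi = len-1 = -1 on the empty list makes the loop body never run, as here with hi = 0
def pvLoop (xs : List Int) (lo hi : Nat) (total : Int) : Int :=
  if lo < hi then pvLoop xs (lo + 1) (hi - 1) (total + (xs.getD hi 0 - xs.getD lo 0)) else total
termination_by hi - lo

def solve_alt (A : String) : Int :=
  let xs := ((PySem.List.enumerate A.toList 0).filter (fun p => p.2 == 'x')).map (fun p => p.1)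
  let crosses := (PySem.List.enumerate xs 0).map (fun p => p.2 - p.1)
  pvLoop crosses 0 (crosses.length - 1) 0 % 10000003

-- ===== PRECONDITION & SPEC =====
def Spec_solve (A : String) (out : Int) : Prop := out = solve_alt A
instance (A : String) (out : Int) : Decidable (Spec_solve A out) := by unfold Spec_solve; infer_instance

-- ===== CLAIM (what is proved, stated in full; the proofs are below) =====
def Claim_equal_solve : Prop := ∀ (A : String), Dom_solve A → Spec_solve A (solve A)

-- ===== LEMMAS AND PROOFS =====

-- Pairwise-(<) int lists grow at least by 1 per step
theorem pv_lt_get (l : List Int) (hp : l.Pairwise (· < ·)) :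
    ∀ (k : Nat) (h : k < l.length) (c : Int), (∀ y ∈ l, c < y) → c + k < l[k] := by
  induction l with
  | nil => intro k h; simp at h
  | cons z t ih =>
    intro k h c hc
    cases k with
    | zero => simpa using hc z (by simp)
    | succ k =>
      have ht := (List.pairwise_cons.mp hp).2
      have hz := (List.pairwise_cons.mp hp).1
      have := ih ht k (by simpa using h) z hz
      have hcz : c < z := hc z (by simp)
      simp only [List.getElem_cons_succ]
      omega

-- after subtracting the position, a strictly increasing list becomes non-decreasing
theorem pv_enum_mono (l : List Int) (hp : l.Pairwise (· < ·)) (s : Int) :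
    ((PySem.List.enumerate l s).map (fun p => p.2 - p.1)).Pairwise (· ≤ ·) := by
  induction l generalizing s with
  | nil => simp [PySem.List.enumerate_nil]
  | cons c t ih =>
    have hc := (List.pairwise_cons.mp hp).1
    have ht := (List.pairwise_cons.mp hp).2
    rw [PySem.List.enumerate_cons]
    simp only [List.map_cons, List.pairwise_cons]
    refine ⟨?_, ih ht (s + 1)⟩
    intro y hy
    simp only [List.mem_map] at hy
    obtain ⟨p, hp', rfl⟩ := hy
    rw [PySem.List.mem_enumerate_iff] at hp'
    obtain ⟨k, hk, rfl⟩ := hp'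
    have := pv_lt_get t ht k hk c hc
    simp only
    omega

-- the crosses list is non-decreasing
theorem pv_crosses_sorted (A : String) :
    ((PySem.List.enumerate (((PySem.List.enumerate A.toList 0).filter (fun p => p.2 == 'x')).map (fun p => p.1)) 0).map
      (fun p => p.2 - p.1)).Pairwise (· ≤ ·) := by
  apply pv_enum_mono
  have h0 : (PySem.List.enumerate A.toList 0).Pairwise (fun p q => p.1 < q.1) :=
    PySem.List.pairwise_lt_enumerate _ _
  have h1 : ((PySem.List.enumerate A.toList 0).filter (fun p => p.2 == 'x')).Pairwise
      (fun p q => p.1 < q.1) := h0.sublist List.filter_sublist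
  exact List.pairwise_map.mpr h1

-- unfold lemma for the loop, applied with explicit arguments
theorem pvLoop_eq (xs : List Int) (lo hi : Nat) (t : Int) :
    pvLoop xs lo hi t =
      if lo < hi then pvLoop xs (lo + 1) (hi - 1) (t + (xs.getD hi 0 - xs.getD lo 0)) else t := by
  rw [pvLoop]

-- accumulator additivity of the two-pointer loop
theorem pv_loop_acc (xs : List Int) : ∀ (n lo hi : Nat) (t : Int), hi - lo ≤ n →
    pvLoop xs lo hi t = t + pvLoop xs lo hi 0 := by
  intro n
  induction n with
  | zero => intro lo hi t h
            have hlt : ¬ lo < hi := by omega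
            rw [pvLoop_eq xs lo hi t, pvLoop_eq xs lo hi 0]
            simp [hlt]
  | succ n ih =>
    intro lo hi t h
    rw [pvLoop_eq xs lo hi t, pvLoop_eq xs lo hi 0]
    by_cases hlt : lo < hi
    · simp only [hlt, if_true]
      rw [ih (lo+1) (hi-1) (t + (xs.getD hi 0 - xs.getD lo 0)) (by omega),
        ih (lo+1) (hi-1) (0 + (xs.getD hi 0 - xs.getD lo 0)) (by omega)]
      ring
    · simp [hlt]

-- shifting the list left by one element shifts both indices
theorem pv_loop_shift (a : Int) (zs : List Int) : ∀ (n lo hi : Nat) (t : Int), hi - lo ≤ n →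
    pvLoop (a :: zs) (lo + 1) (hi + 1) t = pvLoop zs lo hi t := by
  intro n
  induction n with
  | zero => intro lo hi t h
            have h1 : ¬ lo < hi := by omega
            have h2 : ¬ lo + 1 < hi + 1 := by omega
            rw [pvLoop_eq (a :: zs) (lo+1) (hi+1) t, pvLoop_eq zs lo hi t]
            simp [h1, h2]
  | succ n ih =>
    intro lo hi t h
    rw [pvLoop_eq (a :: zs) (lo+1) (hi+1) t, pvLoop_eq zs lo hi t]
    by_cases hlt : lo < hi
    · have h2 : lo + 1 < hi + 1 := by omega
      simp only [hlt, h2, if_true, List.getD_cons_succ]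
      have h3 : hi + 1 - 1 = (hi - 1) + 1 := by omega
      rw [h3, ih (lo+1) (hi-1) (t + (zs.getD hi 0 - zs.getD lo 0)) (by omega)]
    · have h2 : ¬ lo + 1 < hi + 1 := by omega
      simp [hlt, h2]

-- appending a final element unreachable by hi does not change the loop
theorem pv_loop_dropLast (b : Int) (zs : List Int) : ∀ (n lo hi : Nat) (t : Int), hi - lo ≤ n →
    hi < zs.length → pvLoop (zs ++ [b]) lo hi t = pvLoop zs lo hi t := by
  intro n
  induction n with
  | zero => intro lo hi t h hh
            have hlt : ¬ lo < hi := by omega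
            rw [pvLoop_eq (zs ++ [b]) lo hi t, pvLoop_eq zs lo hi t]
            simp [hlt]
  | succ n ih =>
    intro lo hi t h hh
    rw [pvLoop_eq (zs ++ [b]) lo hi t, pvLoop_eq zs lo hi t]
    by_cases hlt : lo < hi
    · simp only [hlt, if_true]
      rw [List.getD_append _ _ _ _ (by omega), List.getD_append _ _ _ _ (by omega),
        ih (lo+1) (hi-1) (t + (zs.getD hi 0 - zs.getD lo 0)) (by omega) (by omega)]
    · simp [hlt]

-- the extreme-pairing loop equals the sum of absolute deviations from the median
theorem pv_key : ∀ (n : Nat) (xs : List Int), xs.length ≤ n → xs.Pairwise (· ≤ ·) →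
    pvLoop xs 0 (xs.length - 1) 0 = (xs.map (fun x => |x - xs.getD (xs.length / 2) 0|)).sum := by
  intro n
  induction n with
  | zero =>
    intro xs h _
    have hnil : xs = [] := List.length_eq_zero_iff.mp (by omega)
    subst hnil
    rw [pvLoop_eq]
    simp
  | succ n ih =>
    intro xs hlen hsort
    match xs with
    | [] => rw [pvLoop_eq]; simp
    | [a] => rw [pvLoop_eq]; norm_num
    | a :: b0 :: t0 =>
      obtain ⟨ys, b, hty⟩ : ∃ ys b, b0 :: t0 = ys ++ [b] :=
        ⟨(b0 :: t0).dropLast, (b0 :: t0).getLast (by simp),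
          (List.dropLast_concat_getLast (by simp)).symm⟩
      rw [hty] at hsort hlen ⊢
      have hsort' : ((a :: ys) ++ [b]).Pairwise (· ≤ ·) := by simpa using hsort
      have hab : ∀ x ∈ a :: ys, x ≤ b := by
        intro x hx
        exact (List.pairwise_append.mp hsort').2.2 x hx b (by simp)
      have haY : ∀ y ∈ ys ++ [b], a ≤ y := (List.pairwise_cons.mp hsort).1
      match ys with
      | [] =>
        -- xs = [a, b]
        have hab' : a ≤ b := hab a (by simp)
        simp only [List.nil_append]
        rw [show ((a :: [b] : List Int)).length - 1 = 1 from rfl]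
        rw [pvLoop_eq, if_pos (by norm_num), pvLoop_eq, if_neg (by norm_num)]
        simp only [List.getD_cons_succ, List.getD_cons_zero, List.length_cons,
          List.length_nil, List.map_cons, List.map_nil, List.sum_cons, List.sum_nil]
        rw [abs_of_nonpos (by omega : a - b ≤ 0)]
        simp only [sub_self, abs_zero]
        ring
      | y0 :: ys' =>
        set ys := y0 :: ys' with hys
        set L := ys.length with hL
        have hL1 : 1 ≤ L := by simp [hL, hys]
        have hys_sorted : ys.Pairwise (· ≤ ·) := by
          have h1 : (ys ++ [b]).Pairwise (· ≤ ·) := (List.pairwise_cons.mp hsort).2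
          exact h1.sublist (by simp)
        -- LHS
        have hxl : (a :: (ys ++ [b])).length - 1 = L + 1 := by simp [hL]
        rw [hxl, pvLoop_eq, if_pos (by omega)]
        have hgd0 : (a :: (ys ++ [b])).getD 0 0 = a := rfl
        have hgdL : (a :: (ys ++ [b])).getD (L + 1) 0 = b := by
          rw [List.getD_cons_succ, List.getD_append_right _ _ _ _ (by omega)]
          simp [hL]
        rw [hgd0, hgdL]
        rw [show L + 1 - 1 = (L - 1) + 1 by omega]
        rw [pv_loop_shift a (ys ++ [b]) (L - 1) 0 (L - 1) (0 + (b - a)) (by omega)]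
        rw [pv_loop_dropLast b ys (L - 1) 0 (L - 1) (0 + (b - a)) (by omega) (by omega)]
        rw [pv_loop_acc ys (L - 1) 0 (L - 1) (0 + (b - a)) (by omega)]
        have hIH := ih ys (by simp at hlen; omega) hys_sorted
        rw [show L - 1 = ys.length - 1 by rw [hL]]
        rw [hIH]
        -- RHS: the median of xs is the median of ys
        have hmed : (a :: (ys ++ [b])).getD ((a :: (ys ++ [b])).length / 2) 0
            = ys.getD (ys.length / 2) 0 := by
          have h2 : (a :: (ys ++ [b])).length = L + 2 := by simp [hL]
          rw [h2, show (L + 2) / 2 = L / 2 + 1 by omega, List.getD_cons_succ,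
            List.getD_append _ _ _ _ (by omega), hL]
        rw [hmed]
        set m := ys.getD (ys.length / 2) 0 with hm
        have hmmem : m ∈ ys := by
          rw [hm, List.getD_eq_getElem _ _ (by omega)]
          exact List.getElem_mem _
        have ham : a ≤ m := haY m (by simp [hmmem])
        have hmb : m ≤ b := hab m (by simp [hmmem])
        simp only [List.map_cons, List.map_append, List.sum_cons, List.sum_append,
          List.map_nil, List.sum_nil]
        rw [abs_of_nonpos (a := a - m) (by omega), abs_of_nonneg (a := b - m) (by omega)]
        ring

-- A's fold with a mod at every step is the plain sum taken mod once (nonempty list)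
theorem pv_fold_mod (m : Int) : ∀ (xs : List Int) (x : Int) (c : Int),
    (x :: xs).foldl (fun cur cross => (cur + |cross - m|) % 10000003) c
      = (c + ((x :: xs).map (fun v => |v - m|)).sum) % 10000003 := by
  intro xs
  induction xs with
  | nil => intro x c; simp
  | cons y t ih =>
    intro x c
    rw [List.foldl_cons, ih y ((c + |x - m|) % 10000003)]
    simp only [List.map_cons, List.sum_cons]
    omega

-- ===== VERDICT (by name: the statement is the Claim_ definition above) =====
theorem solve_spec : Claim_equal_solve := by
  intro A _
  unfold Spec_solve solve solve_alt
  dsimp only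
  set xs := ((PySem.List.enumerate A.toList 0).filter (fun p => p.2 == 'x')).map (fun p => p.1) with hxs
  set crosses := (PySem.List.enumerate xs 0).map (fun p => p.2 - p.1) with hcr
  have hsorted : crosses.Pairwise (· ≤ ·) := pv_crosses_sorted A
  have hkey := pv_key crosses.length crosses le_rfl hsorted
  by_cases hn : crosses.length = 0
  · have : crosses = [] := List.length_eq_zero_iff.mp hn
    rw [this] at hkey ⊢
    simp [pvLoop]
  · simp only [hn, if_false]
    match hc : crosses with
    | [] => simp at hn
    | v :: vs =>
      rw [pv_fold_mod, hkey]
      omega
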